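-- pv_equiv track=rewrite | github.com/Reva-B98/Project-NLTK | Project_NLTK/gazetteer_annotation.py | annotate_gazetteer
-- ===== SOURCE A (Python) =====
-- def annotate_gazetteer(tokens, gazetteers):
--     gazetteer_annotation = []
--     for token in tokens:
--         annotated = token
--         lowercase_token = token.lower()
--         for category, gazetteer in gazetteers.items():
--             lowercase_gazetteer = {item.lower() for item in gazetteer}
--             if lowercase_token in lowercase_gazetteer:
--                 annotated = f"({token} {category})"
--                 break
--         gazetteer_annotation.append(annotated)
--     return gazetteer_annotation
-- ===== SOURCE B (Python) =====
-- def annotate_gazetteer(tokens, gazetteers):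
--     # Build one lowercase item -> category index up front (first category wins,
--     # matching A's break), then annotate every token with a single dict lookup.
--     index = {}
--     for category, gazetteer in gazetteers.items():
--         for item in gazetteer:
--             index.setdefault(item.lower(), category)
--     result = []
--     for token in tokens:
--         category = index.get(token.lower())
--         result.append(token if category is None else f"({token} {category})")
--     return result
-- ===== Notes on version B (the rewrite author's own statement) =====
-- stated objective: faster
-- what changed: B builds one lowercased item-to-category dict before the token loop (setdefault keeps the first category, matching A's break) and annotates each token with a single O(1) lookup, instead of A rebuilding a lowered set of every gazetteer inside the per-token scan.
import Mathlib
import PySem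

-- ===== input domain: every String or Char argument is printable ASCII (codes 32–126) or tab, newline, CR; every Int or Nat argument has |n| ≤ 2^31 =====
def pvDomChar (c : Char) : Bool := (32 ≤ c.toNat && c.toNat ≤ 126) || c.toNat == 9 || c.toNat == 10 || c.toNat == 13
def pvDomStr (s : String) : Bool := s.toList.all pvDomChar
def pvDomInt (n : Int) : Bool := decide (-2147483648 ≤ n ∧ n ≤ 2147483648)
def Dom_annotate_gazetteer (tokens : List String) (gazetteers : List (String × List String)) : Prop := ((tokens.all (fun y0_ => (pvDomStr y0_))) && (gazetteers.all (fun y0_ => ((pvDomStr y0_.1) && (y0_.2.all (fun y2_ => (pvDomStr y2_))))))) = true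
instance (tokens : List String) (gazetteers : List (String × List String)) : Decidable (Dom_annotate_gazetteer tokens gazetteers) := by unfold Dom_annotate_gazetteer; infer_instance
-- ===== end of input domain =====

-- B builds one lowercased item→category index before the token loop and annotates each token
-- by a single dict lookup, instead of A's per-token scan that rebuilds a lowered set of each gazetteer.

-- ===== PORT A =====
-- inner 'for category, gazetteer in gazetteers.items(): … break' as structural recursion
def pvAFind (token lowercase_token : String) : List (String × List String) → String
  | [] => token
  | (category, gazetteer) :: rest =>
      let lowercase_gazetteer : PySem.Set String := PySem.Set.ofList (gazetteer.map PySem.Str.lower)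
      if PySem.Set.contains lowercase_gazetteer lowercase_token then
        "(" ++ token ++ " " ++ category ++ ")"
      else
        pvAFind token lowercase_token rest

def annotate_gazetteer (tokens : List String) (gazetteers : List (String × List String)) : List String :=
  tokens.foldl (fun gazetteer_annotation token =>
    gazetteer_annotation ++ [pvAFind token (PySem.Str.lower token) gazetteers]) []

-- ===== PORT B =====
def pvBIndex (gazetteers : List (String × List String)) : PySem.Dict String String :=
  gazetteers.foldl (fun index p =>
    p.2.foldl (fun index item => index.setdefault (PySem.Str.lower item) p.1) index)
    PySem.Dict.empty

def annotate_gazetteer_alt (tokens : List String) (gazetteers : List (String × List String)) : List String :=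
  let index := pvBIndex gazetteers
  tokens.foldl (fun result token =>
    result ++ [match index.get? (PySem.Str.lower token) with
               | none => token
               | some category => "(" ++ token ++ " " ++ category ++ ")"]) []

-- ===== PRECONDITION & SPEC =====
def Spec_annotate_gazetteer (tokens : List String) (gazetteers : List (String × List String)) (out : List String) : Prop := out = annotate_gazetteer_alt tokens gazetteers
instance (tokens : List String) (gazetteers : List (String × List String)) (out : List String) : Decidable (Spec_annotate_gazetteer tokens gazetteers out) := by unfold Spec_annotate_gazetteer; infer_instance

-- ===== CLAIM (what is proved, stated in full; the proofs are below) =====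
def Claim_equal_annotate_gazetteer : Prop := ∀ (tokens : List String) (gazetteers : List (String × List String)), Dom_annotate_gazetteer tokens gazetteers → Spec_annotate_gazetteer tokens gazetteers (annotate_gazetteer tokens gazetteers)

-- ===== LEMMAS AND PROOFS =====

def pvFirstCat (k : String) (gazetteers : List (String × List String)) : Option String :=
  (gazetteers.find? (fun p => p.2.any (fun item => PySem.Str.lower item == k))).map Prod.fst

-- lookup after inserting one gazetteer's items with setdefault
lemma pvInner_get? (items : List String) (c : String) (d : PySem.Dict String String) (k : String) :
    (items.foldl (fun index item => index.setdefault (PySem.Str.lower item) c) d).get? k =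
      match d.get? k with
      | some v => some v
      | none => if items.any (fun item => PySem.Str.lower item == k) then some c else none := by
  induction items generalizing d with
  | nil => cases h : d.get? k <;> simpa using h
  | cons x xs ih =>
      simp only [List.foldl_cons, ih]
      by_cases hx : k = PySem.Str.lower x
      · rw [hx, PySem.Dict.get?_setdefault_self]
        cases h : d.get? (PySem.Str.lower x) <;> simp
      · rw [PySem.Dict.get?_setdefault_of_ne d c hx]
        cases h : d.get? k <;> simp [List.any_cons, Ne.symm hx]

-- lookup in the full index = first matching category
lemma pvIndex_get? (gazetteers : List (String × List String)) (d : PySem.Dict String String) (k : String) :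
    (gazetteers.foldl (fun index p =>
        p.2.foldl (fun index item => index.setdefault (PySem.Str.lower item) p.1) index) d).get? k =
      match d.get? k with
      | some v => some v
      | none => pvFirstCat k gazetteers := by
  induction gazetteers generalizing d with
  | nil => cases h : d.get? k <;> simpa [pvFirstCat] using h
  | cons p ps ih =>
      simp only [List.foldl_cons, ih, pvInner_get?]
      cases hm : p.2.any (fun item => PySem.Str.lower item == k) <;>
        cases h : d.get? k <;>
          simp [pvFirstCat, hm]

lemma pvFirstCat_cons (k c : String) (items : List String) (ps : List (String × List String)) :
    pvFirstCat k ((c, items) :: ps) =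
      if items.any (fun item => PySem.Str.lower item == k) then some c else pvFirstCat k ps := by
  unfold pvFirstCat
  rw [List.find?_cons]
  cases hm : items.any (fun item => PySem.Str.lower item == k) <;> simp

lemma pvAFind_eq (token k : String) (gazetteers : List (String × List String)) :
    pvAFind token k gazetteers =
      match pvFirstCat k gazetteers with
      | none => token
      | some category => "(" ++ token ++ " " ++ category ++ ")" := by
  induction gazetteers with
  | nil => simp [pvAFind, pvFirstCat]
  | cons p ps ih =>
      obtain ⟨c, items⟩ := p
      have hset : (PySem.Set.ofList (items.map PySem.Str.lower)).contains k
          = items.any (fun item => PySem.Str.lower item == k) := by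
        cases hb : items.any (fun item => PySem.Str.lower item == k) with
        | false =>
            apply Bool.eq_false_iff.2
            intro hc
            have hmem := (PySem.Set.contains_iff _ _).1 hc
            rw [PySem.Set.mem_ofList] at hmem
            obtain ⟨it, hit, hlk⟩ := List.mem_map.1 hmem
            have hany : items.any (fun item => PySem.Str.lower item == k) = true := by
              rw [List.any_eq_true]
              exact ⟨it, hit, beq_of_eq hlk⟩
            simp [hb] at hany
        | true =>
            apply (PySem.Set.contains_iff _ _).2
            rw [PySem.Set.mem_ofList]
            obtain ⟨it, hit, hlk⟩ := List.any_eq_true.1 hb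
            exact List.mem_map.2 ⟨it, hit, beq_iff_eq.1 hlk⟩
      simp only [pvAFind, hset, pvFirstCat_cons]
      cases hm : items.any (fun item => PySem.Str.lower item == k) <;> simp [ih]

-- foldl with append-singleton is map
lemma pvFoldl_map (f : String → String) (ts : List String) :
    ts.foldl (fun acc t => acc ++ [f t]) [] = ts.map f := by
  suffices h : ∀ acc, ts.foldl (fun acc t => acc ++ [f t]) acc = acc ++ ts.map f by
    simpa using h []
  induction ts with
  | nil => intro acc; simp
  | cons t ts ih => intro acc; simp [ih]

-- ===== VERDICT (by name: the statement is the Claim_ definition above) =====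
theorem annotate_gazetteer_spec : Claim_equal_annotate_gazetteer := by
  intro tokens gazetteers _
  show _ = _
  unfold annotate_gazetteer annotate_gazetteer_alt pvBIndex
  simp only [pvFoldl_map]
  refine List.map_congr_left (fun t _ => ?_)
  rw [pvAFind_eq, pvIndex_get?]
  simp
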